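-- pv_equiv track=rewrite | github.com/praton1729/interviewbit | Arrays/find_Perm.py | find_Perm
-- ===== SOURCE A (Python) =====
-- def find_Perm(A,B):
--
--     # A is the string
--     # B is the number
--
--     n = B
--     sample = []
--
--     left = 1
--     right = n
--
--     for i in range(0,len(A)):
--
--         if(A[i]=='I'):
--             sample.append(left)
--             left = left + 1
--         else:
--             sample.append(right)
--             right = right -1
--
--     sample.append(left)
--
--     return sample
-- ===== SOURCE B (Python) =====
-- def find_Perm(A, B):
--     n = len(A)
--     result = [0] * (n + 1)
--     # ascending sweep: 'I' positions (and the trailing slot) get 1, 2, ...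
--     val = 1
--     for idx in range(n + 1):
--         if idx == n or A[idx] == 'I':
--             result[idx] = val
--             val += 1
--     # descending sweep: every other position gets B, B-1, ...
--     val = B
--     for idx in range(n):
--         if A[idx] != 'I':
--             result[idx] = val
--             val -= 1
--     return result
-- ===== Notes on version B (the rewrite author's own statement) =====
-- stated objective: alternative
-- what changed: Replaces A's single interleaved loop that appends left/right counters with a preallocated [0]*(len(A)+1) array filled by two categorized index sweeps: an ascending sweep writing 1,2,... at 'I' positions (and the trailing slot), then a descending sweep writing B,B-1,... at the remaining positions.
import Mathlib
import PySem

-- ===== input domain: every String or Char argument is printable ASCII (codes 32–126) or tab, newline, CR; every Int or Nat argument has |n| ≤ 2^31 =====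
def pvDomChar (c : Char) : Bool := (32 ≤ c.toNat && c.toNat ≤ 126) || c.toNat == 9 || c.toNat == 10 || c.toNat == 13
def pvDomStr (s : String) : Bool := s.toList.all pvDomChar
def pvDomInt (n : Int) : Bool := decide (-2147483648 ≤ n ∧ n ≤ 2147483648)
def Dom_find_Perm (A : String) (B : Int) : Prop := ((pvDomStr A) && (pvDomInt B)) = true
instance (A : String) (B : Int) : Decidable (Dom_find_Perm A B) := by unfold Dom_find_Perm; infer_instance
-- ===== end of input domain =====

-- B replaces A's single interleaved append loop by a preallocated array filled by two
-- categorized index sweeps (ascending run, then descending run); objective: alternative decomposition.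

-- ===== PORT A =====
-- one pass, appending `left` on 'I' (then incrementing) and `right` otherwise (then
-- decrementing); finally appends `left`.
def find_Perm (A : String) (B : Int) : List Int :=
  let n := B
  let st := A.toList.foldl
    (fun (s : List Int × Int × Int) c =>
      if c = 'I' then (s.1 ++ [s.2.1], s.2.1 + 1, s.2.2)
      else (s.1 ++ [s.2.2], s.2.1, s.2.2 - 1))
    (([] : List Int), 1, n)
  st.1 ++ [st.2.1]

-- ===== PORT B =====
-- result = [0]*(n+1); first sweep writes 1,2,… at 'I' positions and the trailing slot,
-- second sweep writes B,B-1,… at the remaining positions.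
def find_Perm_alt (A : String) (B : Int) : List Int :=
  ((PySem.List.pyRange 0 ((A.toList.length : Int)) 1).foldl
    (fun (s : List Int × Int) idx =>
      if ¬ PySem.List.pyGet? A.toList idx = some 'I'
      then (s.1.set idx.toNat s.2, s.2 - 1) else s)
    (((PySem.List.pyRange 0 ((A.toList.length : Int) + 1) 1).foldl
        (fun (s : List Int × Int) idx =>
          if idx = (A.toList.length : Int) ∨ PySem.List.pyGet? A.toList idx = some 'I'
          then (s.1.set idx.toNat s.2, s.2 + 1) else s)
        (List.replicate ((A.toList.length : Int) + 1).toNat 0, 1)).1, B)).1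

-- ===== PRECONDITION & SPEC =====
def Spec_find_Perm (A : String) (B : Int) (out : List Int) : Prop := out = find_Perm_alt A B
instance (A : String) (B : Int) (out : List Int) : Decidable (Spec_find_Perm A B out) := by unfold Spec_find_Perm; infer_instance

-- ===== CLAIM (what is proved, stated in full; the proofs are below) =====
def Claim_equal_find_Perm : Prop := ∀ (A : String) (B : Int), Dom_find_Perm A B → Spec_find_Perm A B (find_Perm A B)

-- ===== LEMMAS AND PROOFS =====

-- the common reference: the permutation A builds, as a structural recursion
def permSpec : List Char → Int → Int → List Int
  | [], l, _ => [l]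
  | c :: t, l, r =>
    if c = 'I' then l :: permSpec t (l + 1) r else r :: permSpec t l (r - 1)

-- step functions of B's two sweeps, over a Nat index
def step1 (cs : List Char) (s : List Int × Int) (k : Nat) : List Int × Int :=
  if (k : Int) = (cs.length : Int) ∨ PySem.List.pyGet? cs (k : Int) = some 'I'
  then (s.1.set k s.2, s.2 + 1) else s

def step2 (cs : List Char) (s : List Int × Int) (k : Nat) : List Int × Int :=
  if ¬ PySem.List.pyGet? cs (k : Int) = some 'I'
  then (s.1.set k s.2, s.2 - 1) else s

lemma rangeCast (m : Nat) :
    PySem.List.pyRange 0 (m : Int) 1 = (List.range m).map (Nat.cast : Nat → Int) := by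
  induction m with
  | zero => simp
  | succ m ih =>
    have h : ((m + 1 : Nat) : Int) = (m : Int) + 1 := by push_cast; ring
    rw [h, PySem.List.pyRange_one_succ_right (by positivity), ih, List.range_succ]
    simp

-- A's fold appends permSpec
lemma foldA (cs : List Char) : ∀ (acc : List Int) (l r : Int),
    (let st := cs.foldl
      (fun (s : List Int × Int × Int) c =>
        if c = 'I' then (s.1 ++ [s.2.1], s.2.1 + 1, s.2.2)
        else (s.1 ++ [s.2.2], s.2.1, s.2.2 - 1)) (acc, l, r)
     st.1 ++ [st.2.1]) = acc ++ permSpec cs l r := by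
  induction cs with
  | nil => intro acc l r; simp [permSpec]
  | cons c t ih =>
    intro acc l r
    by_cases h : c = 'I' <;> simp [permSpec, h, ih, List.append_assoc]

lemma step1_shift (ks : List Nat) : ∀ (t : List Char) (c : Char) (a : Int) (xs : List Int) (v : Int),
    (ks.map Nat.succ).foldl (step1 (c :: t)) (a :: xs, v) =
      (a :: (ks.foldl (step1 t) (xs, v)).1, (ks.foldl (step1 t) (xs, v)).2) := by
  induction ks with
  | nil => intro t c a xs v; simp
  | cons k ks ih =>
    intro t c a xs v
    have hstep : step1 (c :: t) (a :: xs, v) (k + 1) =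
        ((step1 t (xs, v) k).1.cons a, (step1 t (xs, v) k).2) := by
      simp only [step1, Int.toNat_natCast, List.length_cons, Nat.cast_add, Nat.cast_one,
        PySem.List.pyGet?_cons_succ, List.set_cons_succ, add_left_inj]
      split_ifs <;> rfl
    simp only [Nat.succ_eq_add_one, List.map_cons, List.foldl_cons, hstep, ih]

lemma step2_shift (ks : List Nat) : ∀ (t : List Char) (c : Char) (a : Int) (xs : List Int) (v : Int),
    (ks.map Nat.succ).foldl (step2 (c :: t)) (a :: xs, v) =
      (a :: (ks.foldl (step2 t) (xs, v)).1, (ks.foldl (step2 t) (xs, v)).2) := by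
  induction ks with
  | nil => intro t c a xs v; simp
  | cons k ks ih =>
    intro t c a xs v
    have hstep : step2 (c :: t) (a :: xs, v) (k + 1) =
        ((step2 t (xs, v) k).1.cons a, (step2 t (xs, v) k).2) := by
      simp only [step2, Nat.cast_add, Nat.cast_one,
        PySem.List.pyGet?_cons_succ, List.set_cons_succ]
      split_ifs <;> rfl
    simp only [Nat.succ_eq_add_one, List.map_cons, List.foldl_cons, hstep, ih]

-- B's first sweep builds the ascending skeleton
def pass1 : List Char → Int → List Int
  | [], v => [v]
  | c :: t, v => if c = 'I' then v :: pass1 t (v + 1) else 0 :: pass1 t v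

lemma fold1 (cs : List Char) : ∀ (v : Int),
    ((List.range (cs.length + 1)).foldl (step1 cs) (List.replicate (cs.length + 1) 0, v)).1
      = pass1 cs v := by
  induction cs with
  | nil =>
    intro v
    simp [step1, pass1, List.range_succ]
  | cons c t ih =>
    intro v
    have h0 : step1 (c :: t) (List.replicate (t.length + 1 + 1) 0, v) 0 =
        if c = 'I' then (v :: List.replicate (t.length + 1) 0, v + 1)
        else ((0 : Int) :: List.replicate (t.length + 1) 0, v) := by
      have hne : ¬ (0 : Int) = (t.length : Int) + 1 := by omega
      by_cases hc : c = 'I' <;>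
        simp [step1, hne, hc, List.replicate_succ]
    simp only [List.length_cons]
    rw [List.range_succ_eq_map, List.foldl_cons, h0]
    by_cases hc : c = 'I'
    · rw [if_pos hc, step1_shift]
      simp [pass1, hc, ih]
    · rw [if_neg hc, step1_shift]
      simp [pass1, hc, ih]

-- B's second sweep on the skeleton yields permSpec
lemma fold2 (cs : List Char) : ∀ (l r : Int),
    ((List.range cs.length).foldl (step2 cs) (pass1 cs l, r)).1 = permSpec cs l r := by
  induction cs with
  | nil => intro l r; simp [pass1, permSpec]
  | cons c t ih =>
    intro l r
    simp only [List.length_cons]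
    rw [List.range_succ_eq_map, List.foldl_cons]
    by_cases hc : c = 'I'
    · have h0 : step2 (c :: t) (pass1 (c :: t) l, r) 0 = (l :: pass1 t (l + 1), r) := by
        simp [step2, pass1, hc]
      rw [h0, step2_shift]
      simp [permSpec, hc, ih]
    · have h0 : step2 (c :: t) (pass1 (c :: t) l, r) 0 = (r :: pass1 t l, r - 1) := by
        simp [step2, pass1, hc]
      rw [h0, step2_shift]
      simp [permSpec, hc, ih]

lemma alt_eq_permSpec (A : String) (B : Int) :
    find_Perm_alt A B = permSpec A.toList 1 B := by
  unfold find_Perm_alt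
  have hc1 : ((A.toList.length : Int) + 1) = ((A.toList.length + 1 : Nat) : Int) := by
    push_cast; ring
  rw [hc1, rangeCast, rangeCast, List.foldl_map, List.foldl_map]
  have e1 : (fun (s : List Int × Int) (k : Nat) =>
      if (k : Int) = (A.toList.length : Int) ∨ PySem.List.pyGet? A.toList (k : Int) = some 'I'
      then (s.1.set k s.2, s.2 + 1) else s) = step1 A.toList := by
    funext s k; simp [step1]
  have e2 : (fun (s : List Int × Int) (k : Nat) =>
      if ¬ PySem.List.pyGet? A.toList (k : Int) = some 'I'
      then (s.1.set k s.2, s.2 - 1) else s) = step2 A.toList := by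
    funext s k; simp [step2]
  simp only [Int.toNat_natCast]
  simp only [e1, e2]
  rw [fold1, fold2]

-- ===== VERDICT (by name: the statement is the Claim_ definition above) =====
theorem find_Perm_spec : Claim_equal_find_Perm := by
  intro A B _
  unfold Spec_find_Perm
  rw [alt_eq_permSpec]
  have := foldA A.toList [] 1 B
  simpa [find_Perm] using this
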